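-- pv_equiv track=rewrite | github.com/Makhnach12/Pyhton_studing | generator.py | queue_7
-- ===== SOURCE A (Python) =====
-- def queue_7(opening_hours: int) -> str:
--     SIZE_QUEUE = 5
--     increasing_the_queue = 1
--     counter = 0
--     position = 0
--     while counter < opening_hours:
--         if position >= SIZE_QUEUE * increasing_the_queue:
--             position = 0
--             increasing_the_queue *= 2
--         yield person_in_queue[position // increasing_the_queue]
--         counter += 1
--         position += 1
--
-- person_in_queue = ['Иван', 'Матвей', 'Никита', 'Маргарита', 'Любовь']
-- ===== SOURCE B (Python) =====
-- person_in_queue = ['Иван', 'Матвей', 'Никита', 'Маргарита', 'Любовь']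
--
--
-- def queue_7(opening_hours: int) -> str:
--     count = 0
--     rep = 1
--     while count < opening_hours:
--         for name in person_in_queue:
--             for _ in range(rep):
--                 if count >= opening_hours:
--                     return
--                 yield name
--                 count += 1
--         rep *= 2
-- ===== Notes on version B (the rewrite author's own statement) =====
-- stated objective: simpler
-- what changed: A walks a flat position counter and recovers each name by division (position // increasing_the_queue) with a reset-and-double check per step; B uses nested loops (rounds x names x repetitions) with a doubling repetition count, emitting each name directly with no index arithmetic.
import Mathlib
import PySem

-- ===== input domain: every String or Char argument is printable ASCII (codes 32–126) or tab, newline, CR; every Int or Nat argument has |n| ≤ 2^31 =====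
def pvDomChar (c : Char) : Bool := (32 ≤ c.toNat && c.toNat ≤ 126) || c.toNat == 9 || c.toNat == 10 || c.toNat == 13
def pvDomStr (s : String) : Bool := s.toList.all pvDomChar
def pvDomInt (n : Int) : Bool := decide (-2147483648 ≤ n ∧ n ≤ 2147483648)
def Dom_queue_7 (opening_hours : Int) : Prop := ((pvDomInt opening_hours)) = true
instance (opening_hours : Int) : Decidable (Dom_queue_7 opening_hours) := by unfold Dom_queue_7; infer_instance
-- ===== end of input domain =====

-- B replaces A's flat position counter and per-step division/reset arithmetic by plain
-- nested loops (rounds × names × repetitions) with a doubling repetition count: simpler.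
-- Both Pythons are generators; the equivalence is about the produced sequence (list).

-- the module-level constant person_in_queue (shared by both sources)
def person_in_queue : List String := ["Иван", "Матвей", "Никита", "Маргарита", "Любовь"]

-- ===== PORT A =====
-- A's while loop; one element per recursive call, state (increasing_the_queue, counter, position).
-- The list index is always in range starting from the entry state, so the (unreachable)
-- IndexError branch of pyGet? returns [].
def queue_7_go (n inc counter pos : Int) : List String :=
  if _h : counter < n then
    let pi : Int × Int := if pos ≥ 5 * inc then (0, 2 * inc) else (pos, inc)
    match PySem.List.pyGet? person_in_queue (PySem.Int.floordiv pi.1 pi.2) with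
    | some nm => nm :: queue_7_go n pi.2 (counter + 1) (pi.1 + 1)
    | none => []  -- IndexError (never reached from the entry state)
  else []
termination_by (n - counter).toNat
decreasing_by omega

def queue_7 (opening_hours : Int) : List String :=
  queue_7_go opening_hours 1 0 0

-- ===== PORT B =====
-- innermost loop: `for _ in range(rep): if count >= n: return; yield name; count += 1`
-- result: (emitted names, final count, early-return flag)
def bInner (n : Int) (nm : String) (rep : Nat) (count : Int) : List String × Int × Bool :=
  match rep with
  | 0 => ([], count, false)
  | r + 1 =>
    if n ≤ count then ([], count, true)
    else
      let t := bInner n nm r (count + 1)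
      (nm :: t.1, t.2.1, t.2.2)

-- middle loop: `for name in person_in_queue: …`, propagating the early return
def bNames (n : Int) (names : List String) (rep : Nat) (count : Int) : List String × Int × Bool :=
  match names with
  | [] => ([], count, false)
  | nm :: rest =>
    let t := bInner n nm rep count
    if t.2.2 then (t.1, t.2.1, true)
    else
      let t2 := bNames n rest rep t.2.1
      (t.1 ++ t2.1, t2.2.1, t2.2.2)

-- two lemmas the outer while loop needs for termination (count strictly grows per round)
theorem bInner_count_le (n : Int) (nm : String) (rep : Nat) (count : Int) :
    count ≤ (bInner n nm rep count).2.1 := by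
  induction rep generalizing count with
  | zero => simp [bInner]
  | succ r ih =>
    simp only [bInner]
    split
    · simp
    · exact le_trans (by omega) (ih (count + 1))

theorem bNames_count_le (n : Int) (names : List String) (rep : Nat) (count : Int) :
    count ≤ (bNames n names rep count).2.1 := by
  induction names generalizing count with
  | nil => simp [bNames]
  | cons nm rest ih =>
    simp only [bNames]
    have h1 := bInner_count_le n nm rep count
    split
    · simpa using h1
    · exact le_trans h1 (ih _)

theorem bNames_count_lt (n : Int) (names : List String) (rep : Nat) (count : Int)
    (hn : names ≠ []) (hr : 0 < rep) (hc : count < n) :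
    count < (bNames n names rep count).2.1 := by
  match names with
  | [] => exact absurd rfl hn
  | nm :: rest =>
    obtain ⟨r, rfl⟩ : ∃ r, rep = r + 1 := ⟨rep - 1, by omega⟩
    have h3 : count < (bInner n nm (r + 1) count).2.1 := by
      simp only [bInner, not_le.mpr hc, if_false]
      have := bInner_count_le n nm r (count + 1); omega
    simp only [bNames]
    split
    · simpa using h3
    · exact lt_of_lt_of_le h3 (bNames_count_le n rest (r + 1) _)

-- outer while loop; rep is kept as m+1 (rep starts at 1 and doubles: 2*(m+1) = (2*m+1)+1)
def bWhile (n count : Int) (m : Nat) : List String :=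
  if _h : count < n then
    let t := bNames n person_in_queue (m + 1) count
    if t.2.2 then t.1
    else t.1 ++ bWhile n t.2.1 (2 * m + 1)
  else []
termination_by (n - count).toNat
decreasing_by
  have := bNames_count_lt n person_in_queue (m + 1) count (by simp [person_in_queue]) (by omega) _h
  omega

def queue_7_alt (opening_hours : Int) : List String :=
  bWhile opening_hours 0 0

-- ===== PRECONDITION & SPEC =====
def Spec_queue_7 (opening_hours : Int) (out : List String) : Prop := out = queue_7_alt opening_hours
instance (opening_hours : Int) (out : List String) : Decidable (Spec_queue_7 opening_hours out) := by unfold Spec_queue_7; infer_instance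

-- ===== CLAIM (what is proved, stated in full; the proofs are below) =====
def Claim_equal_queue_7 : Prop := ∀ (opening_hours : Int), Dom_queue_7 opening_hours → Spec_queue_7 opening_hours (queue_7 opening_hours)

-- ===== LEMMAS AND PROOFS =====

-- one round of the stream: every name repeated rep times
def roundL (l : List String) (rep : Nat) : List String := l.flatMap (fun nm => List.replicate rep nm)

-- finite approximation of the infinite name stream, starting at repetition m+1
def streamF : Nat → Nat → List String
  | 0, _ => []
  | f + 1, m => roundL person_in_queue (m + 1) ++ streamF f (2 * m + 1)

theorem roundL_length (l : List String) (rep : Nat) : (roundL l rep).length = l.length * rep := by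
  induction l with
  | nil => simp [roundL]
  | cons a t ih => simp [roundL, Nat.succ_mul] at ih ⊢; omega

theorem roundL_getElem? (l : List String) (rep p : Nat) (hr : 0 < rep) (hp : p < l.length * rep) :
    (roundL l rep)[p]? = l[p / rep]? := by
  induction l generalizing p with
  | nil => simp at hp
  | cons a t ih =>
    simp only [roundL, List.flatMap_cons]
    by_cases h : p < rep
    · rw [List.getElem?_append_left (by simpa using h)]
      rw [Nat.div_eq_of_lt h]
      simp [h]
    · push Not at h
      rw [List.getElem?_append_right (by simpa using h)]
      rw [Nat.div_eq_sub_div hr h]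
      simp only [List.length_replicate]
      have := ih (p - rep) (by simp [Nat.succ_mul] at hp; omega)
      simp only [roundL] at this
      rw [this]
      simp

theorem bInner_of_le (n : Int) (nm : String) (rep : Nat) (count : Int)
    (h : (rep : Int) ≤ n - count) :
    bInner n nm rep count = (List.replicate rep nm, count + rep, false) := by
  induction rep generalizing count with
  | zero => simp [bInner]
  | succ r ih =>
    have hc : ¬ n ≤ count := by push Not; omega
    rw [bInner, if_neg hc, ih (count + 1) (by push_cast at h ⊢; omega)]
    simp [List.replicate_succ]
    omega

theorem bInner_of_gt (n : Int) (nm : String) (rep : Nat) (count : Int)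
    (hr : 0 < rep) (h : n - count < rep) :
    bInner n nm rep count = (List.replicate (n - count).toNat nm, count + (n - count).toNat, true) := by
  induction rep generalizing count with
  | zero => omega
  | succ r ih =>
    by_cases hc : n ≤ count
    · rw [bInner, if_pos hc]
      have : (n - count).toNat = 0 := by omega
      simp [this]
    · push Not at hc
      have hr0 : 0 < r := by push_cast at h; omega
      rw [bInner, if_neg (by push Not; omega),
          ih (count + 1) hr0 (by push_cast at h ⊢; omega)]
      have h1 : (n - (count + 1)).toNat + 1 = (n - count).toNat := by omega
      simp only [← h1, List.replicate_succ, Prod.mk.injEq]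
      refine ⟨trivial, by push_cast; ring, trivial⟩

theorem bNames_of_le (n : Int) (l : List String) (rep : Nat) (count : Int)
    (h : ((l.length * rep : Nat) : Int) ≤ n - count) :
    bNames n l rep count = (roundL l rep, count + (l.length * rep : Nat), false) := by
  induction l generalizing count with
  | nil => simp [bNames, roundL]
  | cons nm t ih =>
    have e : (nm :: t).length * rep = t.length * rep + rep := by simp [Nat.succ_mul]
    rw [e] at h; push_cast at h
    have h1 : (rep : Int) ≤ n - count := by omega
    rw [bNames, bInner_of_le n nm rep count h1]
    simp only [Bool.false_eq_true, if_false]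
    rw [ih (count + rep) (by push_cast; omega)]
    simp only [roundL, List.flatMap_cons, Prod.mk.injEq, e]
    refine ⟨trivial, by push_cast; ring, trivial⟩

theorem bNames_of_gt (n : Int) (l : List String) (rep : Nat) (count : Int)
    (hr : 0 < rep) (h0 : 0 ≤ n - count) (h : n - count < ((l.length * rep : Nat) : Int)) :
    bNames n l rep count
      = ((roundL l rep).take (n - count).toNat, count + (n - count).toNat, true) := by
  induction l generalizing count with
  | nil => simp at h; omega
  | cons nm t ih =>
    by_cases h1 : n - count < rep
    · rw [bNames, bInner_of_gt n nm rep count hr h1]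
      simp only [if_pos]
      simp only [roundL, List.flatMap_cons]
      rw [List.take_append, List.take_replicate, List.length_replicate]
      have : (n - count).toNat - rep = 0 := by omega
      rw [this, min_eq_left (by omega)]
      simp
    · push Not at h1
      have e : (nm :: t).length * rep = t.length * rep + rep := by simp [Nat.succ_mul]
      rw [e] at h; push_cast at h
      rw [bNames, bInner_of_le n nm rep count h1]
      simp only [Bool.false_eq_true, if_false]
      rw [ih (count + rep) (by omega) (by push_cast; omega)]
      simp only [roundL, List.flatMap_cons]
      rw [List.take_append, List.take_replicate, List.length_replicate]
      have e1 : (n - (count + rep)).toNat = (n - count).toNat - rep := by omega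
      rw [min_eq_right (by omega), e1]
      simp only [Prod.mk.injEq]
      refine ⟨trivial, by omega, trivial⟩

theorem person_length : person_in_queue.length = 5 := by decide

theorem bWhile_eq (f : Nat) (n count : Int) (m : Nat) (hf : (n - count).toNat ≤ f) :
    bWhile n count m = (streamF f m).take (n - count).toNat := by
  induction f generalizing count m with
  | zero =>
    have : ¬ count < n := by omega
    rw [bWhile, dif_neg this]
    simp [streamF]
  | succ f ih =>
    by_cases hc : count < n
    · rw [bWhile, dif_pos hc]
      have hL : ((5 * (m + 1) : Nat) : Int) = ((person_in_queue.length * (m + 1) : Nat) : Int) := by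
        rw [person_length]
      by_cases hk : ((5 * (m + 1) : Nat) : Int) ≤ n - count
      · rw [bNames_of_le n person_in_queue (m + 1) count (by rw [← hL]; exact hk)]
        simp only [Bool.false_eq_true, if_false]
        rw [ih (count + (person_in_queue.length * (m + 1) : Nat)) (2 * m + 1) (by push_cast [person_length] at hk ⊢; omega)]
        simp only [streamF, List.take_append]
        rw [List.take_of_length_le (l := roundL person_in_queue (m + 1)) (by rw [roundL_length, person_length]; push_cast [person_length] at hk; omega)]
        have e2 : (n - (count + ((person_in_queue.length * (m + 1) : Nat) : Int))).toNat
            = (n - count).toNat - (roundL person_in_queue (m + 1)).length := by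
          rw [roundL_length, person_length]; push_cast [person_length]; omega
        rw [e2]
      · push Not at hk
        rw [bNames_of_gt n person_in_queue (m + 1) count (by omega) (by omega) (by rw [← hL]; exact hk)]
        simp only [if_pos]
        simp only [streamF, List.take_append, roundL_length, person_length]
        have : (n - count).toNat - 5 * (m + 1) = 0 := by push_cast at hk; omega
        rw [this]
        simp
    · rw [bWhile, dif_neg hc]
      have : (n - count).toNat = 0 := by omega
      simp [this]

-- peel the head off a take of (drop p l ++ s)
theorem take_cons_of_getElem? {α : Type} (l s : List α) (p k : Nat) (x : α)
    (h : l[p]? = some x) :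
    (l.drop p ++ s).take (k + 1) = x :: ((l.drop (p + 1) ++ s).take k) := by
  have hp : p < l.length := by
    by_contra hq
    rw [List.getElem?_eq_none (by omega)] at h
    cases h
  rw [List.drop_eq_getElem_cons hp]
  have : l[p] = x := by
    rw [List.getElem?_eq_getElem hp] at h
    injection h
  simp [this]

theorem take_cons_of_head {α : Type} (l s : List α) (k : Nat) (x : α)
    (h : l[0]? = some x) :
    (l ++ s).take (k + 1) = x :: ((l.drop 1 ++ s).take k) := by
  have := take_cons_of_getElem? l s 0 k x h
  simpa using this

theorem go_eq (k : Nat) : ∀ (f m : Nat) (counter pos n : Int),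
    (n - counter).toNat = k → k ≤ f → 0 ≤ pos → pos ≤ 5 * ((m : Int) + 1) →
    queue_7_go n ((m : Int) + 1) counter pos
      = (((roundL person_in_queue (m + 1)).drop pos.toNat) ++ streamF f (2 * m + 1)).take k := by
  induction k with
  | zero =>
    intro f m counter pos n hk hf h0 h5
    have : ¬ counter < n := by omega
    rw [queue_7_go, dif_neg this]
    simp
  | succ k ih =>
    intro f m counter pos n hk hf h0 h5
    have hc : counter < n := by omega
    rw [queue_7_go, dif_pos hc]
    by_cases hpos : pos ≥ 5 * ((m : Int) + 1)
    · -- reset-and-double step: position wrapped around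
      simp only [if_pos hpos]
      have hdiv : PySem.Int.floordiv 0 (2 * ((m : Int) + 1)) = 0 := by
        rw [PySem.Int.floordiv_eq_ediv_of_pos (by omega)]; simp
      rw [hdiv]
      have hget : PySem.List.pyGet? person_in_queue 0 = some "Иван" := by decide
      rw [hget]
      have hdrop : (roundL person_in_queue (m + 1)).drop pos.toNat = [] := by
        apply List.drop_eq_nil_of_le
        rw [roundL_length, person_length]
        omega
      rw [hdrop, List.nil_append]
      obtain ⟨f', rfl⟩ : ∃ f', f = f' + 1 := ⟨f - 1, by omega⟩
      show _ = (streamF (f' + 1) (2 * m + 1)).take (k + 1)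
      rw [streamF]
      have hhead : (roundL person_in_queue ((2 * m + 1) + 1))[0]? = some "Иван" := by
        rw [roundL_getElem? _ _ _ (by omega) (by rw [person_length]; positivity)]
        simp [Nat.zero_div]
        decide
      rw [take_cons_of_head _ _ k _ hhead]
      have harg : 2 * ((m : Int) + 1) = (((2 * m + 1 : Nat) : Int) + 1) := by push_cast; ring
      rw [harg]
      show "Иван" :: queue_7_go n (((2 * m + 1 : Nat) : Int) + 1) (counter + 1) (0 + 1) = _
      rw [show ((0 : Int) + 1) = 1 from by norm_num,
          ih f' (2 * m + 1) (counter + 1) 1 n (by omega) (by omega) (by omega)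
            (by push_cast; omega)]
      norm_num
    · -- ordinary step within the current round
      simp only [if_neg hpos]
      push Not at hpos
      have hp : pos = ((pos.toNat : Nat) : Int) := (Int.toNat_of_nonneg h0).symm
      have hm1 : ((m : Int) + 1) = (((m + 1 : Nat) : Int)) := by push_cast; ring
      have hplt : pos.toNat < 5 * (m + 1) := by omega
      have hdiv : PySem.Int.floordiv pos ((m : Int) + 1)
          = ((pos.toNat / (m + 1) : Nat) : Int) := by
        rw [hp, hm1]; exact PySem.Int.floordiv_natCast _ _
      rw [hdiv, PySem.List.pyGet?_natCast]
      have hq : pos.toNat / (m + 1) < 5 := by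
        rw [Nat.div_lt_iff_lt_mul (by omega)]; omega
      have hget : person_in_queue[pos.toNat / (m + 1)]?
          = some (person_in_queue[pos.toNat / (m + 1)]'(by rw [person_length]; omega)) :=
        List.getElem?_eq_getElem _
      rw [hget]
      have hround : (roundL person_in_queue (m + 1))[pos.toNat]?
          = some (person_in_queue[pos.toNat / (m + 1)]'(by rw [person_length]; omega)) := by
        rw [roundL_getElem? _ _ _ (by omega) (by rw [person_length]; omega)]
        exact hget
      rw [take_cons_of_getElem? _ _ pos.toNat k _ hround]
      have harg : ((pos + 1).toNat) = pos.toNat + 1 := by omega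
      rw [ih f m (counter + 1) (pos + 1) n (by omega) (by omega) (by omega) (by omega), harg]

-- ===== VERDICT (by name: the statement is the Claim_ definition above) =====
theorem queue_7_spec : Claim_equal_queue_7 := by
  intro n _
  unfold Spec_queue_7 queue_7 queue_7_alt
  have hA := go_eq n.toNat (n.toNat) 0 0 0 n (by omega) le_rfl le_rfl (by norm_num)
  have hB := bWhile_eq (n.toNat + 1) n 0 0 (by omega)
  norm_num at hA
  rw [hA, hB]
  show _ = (streamF (n.toNat + 1) 0).take (n - 0).toNat
  rw [streamF]
  norm_num
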